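-- pv_equiv track=rewrite | github.com/saianuragpeddu/python-assignemts | Session-2/S2C11.py | pairwiseScore
-- ===== SOURCE A (Python) =====
-- def pairwiseScore(seqA, seqB):
--   '''1+1+3-1-1+1+3+1-1-1+1-1-1-1'''
--   print
--   signed = ''
--   score = 0
--   for i in range(len(seqA)):
--     if(seqA[i] == seqB[i]):
--         signed += '|'
--         if i > 0 and signed[len(signed)-2]=='|':
--             score += 3
--         else:
--             score += 1
--
--     else:
--         signed += ' '
--         score -=1
--   return seqA+"\n"+signed+"\n"+seqB+"\n"+'score:'+ str(score)
-- ===== SOURCE B (Python) =====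
-- def pairwiseScore(seqA, seqB):
--   bars = ['|' if x == y else ' ' for x, y in zip(seqA, seqB)]
--   runs = []
--   cur, cnt = None, 0
--   for c in bars:
--     if c == cur:
--       cnt += 1
--     else:
--       if cnt:
--         runs.append((cur, cnt))
--       cur, cnt = c, 1
--   if cnt:
--     runs.append((cur, cnt))
--   signed = ''.join(c * n for c, n in runs)
--   score = sum(3 * n - 2 if c == '|' else -n for c, n in runs)
--   return seqA + "\n" + signed + "\n" + seqB + "\n" + 'score:' + str(score)
-- ===== Notes on version B (the rewrite author's own statement) =====
-- stated objective: alternative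
-- what changed: B run-length-encodes the match/mismatch bar into maximal runs and scores each match-run in closed form (3*L-2 per run of length L, -L per mismatch run) instead of A's per-position lookback at the previous bar character.
import Mathlib
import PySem

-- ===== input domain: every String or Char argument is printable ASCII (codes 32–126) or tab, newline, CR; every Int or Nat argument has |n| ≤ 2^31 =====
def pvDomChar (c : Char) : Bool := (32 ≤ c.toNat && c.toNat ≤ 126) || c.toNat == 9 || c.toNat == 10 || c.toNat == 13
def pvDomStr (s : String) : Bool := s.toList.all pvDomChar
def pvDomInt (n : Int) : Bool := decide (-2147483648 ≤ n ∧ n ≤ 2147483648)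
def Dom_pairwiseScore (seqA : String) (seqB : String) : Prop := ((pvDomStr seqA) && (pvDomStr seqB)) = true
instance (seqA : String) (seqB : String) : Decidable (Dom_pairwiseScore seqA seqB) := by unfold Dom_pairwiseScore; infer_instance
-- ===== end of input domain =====

-- B replaces A's per-position lookback scoring by run-length encoding the bar string and scoring
-- each maximal run in closed form; return values are proved equal whenever Python A returns
-- (Pre_ excludes the IndexError case).

-- ===== PORT A =====
-- A's fused loop: state (signed, score); indexing is exact on Pre_ (both indices in range;
-- the getD defaults are never reached there).
def pairwiseScoreLoop (a b : List Char) : List Char × Int :=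
  (List.range a.length).foldl (fun st i =>
    if a.getD i 'A' = b.getD i 'B' then
      if 0 < i ∧ (st.1 ++ ['|']).getD ((st.1 ++ ['|']).length - 2) ' ' = '|' then
        (st.1 ++ ['|'], st.2 + 3)
      else
        (st.1 ++ ['|'], st.2 + 1)
    else
      (st.1 ++ [' '], st.2 - 1)) ([], 0)

def pairwiseScore (seqA : String) (seqB : String) : String :=
  seqA ++ "\n" ++ String.ofList (pairwiseScoreLoop seqA.toList seqB.toList).1 ++ "\n" ++ seqB
    ++ "\n" ++ "score:" ++ PySem.Int.toStr (pairwiseScoreLoop seqA.toList seqB.toList).2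

-- ===== PORT B =====
-- Source B's run-building loop: state (runs, cur, cnt); 'cur' is None only while cnt = 0, so the
-- getD default on flushing is never reached.
def pvRleStep (st : List (Char × Nat) × Option Char × Nat) (c : Char) :
    List (Char × Nat) × Option Char × Nat :=
  if some c = st.2.1 then (st.1, st.2.1, st.2.2 + 1)
  else ((if st.2.2 ≠ 0 then st.1 ++ [(st.2.1.getD ' ', st.2.2)] else st.1), some c, 1)

-- the loop over bars plus the final flush ('if cnt: runs.append((cur, cnt))')
def pvRuns (xs : List Char) : List (Char × Nat) :=
  let st := xs.foldl pvRleStep ([], none, 0)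
  if st.2.2 ≠ 0 then st.1 ++ [(st.2.1.getD ' ', st.2.2)] else st.1

-- ''.join(c * n for c, n in runs)
def pvExpand (rs : List (Char × Nat)) : List Char := rs.flatMap (fun p => List.replicate p.2 p.1)

-- sum(3 * n - 2 if c == '|' else -n for c, n in runs)
def pvRsum (rs : List (Char × Nat)) : Int :=
  (rs.map (fun p => if p.1 = '|' then 3 * (p.2 : Int) - 2 else -(p.2 : Int))).sum

def pairwiseScore_alt (seqA : String) (seqB : String) : String :=
  seqA ++ "\n"
    ++ String.ofList (pvExpand (pvRuns ((seqA.toList.zip seqB.toList).map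
        (fun p => if p.1 = p.2 then '|' else ' '))))
    ++ "\n" ++ seqB ++ "\n" ++ "score:"
    ++ PySem.Int.toStr (pvRsum (pvRuns ((seqA.toList.zip seqB.toList).map
        (fun p => if p.1 = p.2 then '|' else ' '))))

-- ===== PRECONDITION & SPEC =====
-- Pre_ excludes exactly the inputs where Python A raises IndexError (seqB shorter than seqA).
def Pre_pairwiseScore (seqA : String) (seqB : String) : Prop :=
  seqA.toList.length ≤ seqB.toList.length
instance (seqA : String) (seqB : String) : Decidable (Pre_pairwiseScore seqA seqB) := by
  unfold Pre_pairwiseScore; infer_instance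

def pvWitness_pairwiseScore : String × String := ("GAT|C", "GTT|A")

def Spec_pairwiseScore (seqA : String) (seqB : String) (out : String) : Prop := out = pairwiseScore_alt seqA seqB
instance (seqA : String) (seqB : String) (out : String) : Decidable (Spec_pairwiseScore seqA seqB out) := by unfold Spec_pairwiseScore; infer_instance

-- ===== CLAIM (what is proved, stated in full; the proofs are below) =====
def Claim_equal_pairwiseScore : Prop := ∀ (seqA : String) (seqB : String), Dom_pairwiseScore seqA seqB → Pre_pairwiseScore seqA seqB → Spec_pairwiseScore seqA seqB (pairwiseScore seqA seqB)


-- ===== LEMMAS AND PROOFS =====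

-- the bar character at position i
def pvBar (a b : List Char) (i : Nat) : Char :=
  if a.getD i 'A' = b.getD i 'B' then '|' else ' '

-- the full bar string of length n
def pvSig (a b : List Char) (n : Nat) : List Char :=
  (List.range n).map (pvBar a b)

-- A's scoring step, isolated
def pvScoreStep (a b : List Char) (s : Int) (i : Nat) : Int :=
  if pvBar a b i = '|' then
    if 0 < i ∧ pvBar a b (i - 1) = '|' then s + 3 else s + 1
  else s - 1

-- common reference scoring: left-to-right with the previous character as state
def pvAdj : Option Char → List Char → Int
  | _, [] => 0
  | p, c :: t => (if c = '|' then (if p = some '|' then (3:Int) else 1) else -1) + pvAdj (some c) t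

-- closed-form value of one (possibly partial) run
def pvPart (c : Char) (k : Nat) : Int := if c = '|' then 3 * (k : Int) - 2 else -(k : Int)

theorem pvSig_getD (a b : List Char) {j n : Nat} (h : j < n) :
    (pvSig a b n).getD j ' ' = pvBar a b j := by
  simp [pvSig, List.getD, h]

theorem pvSig_length (a b : List Char) (n : Nat) : (pvSig a b n).length = n := by
  simp [pvSig]

theorem pvSig_succ (a b : List Char) (n : Nat) :
    pvSig a b (n + 1) = pvSig a b n ++ [pvBar a b n] := by
  simp [pvSig, List.range_succ]

theorem pairwiseScoreLoop_eq (a b : List Char) (n : Nat) :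
    (List.range n).foldl (fun st i =>
      if a.getD i 'A' = b.getD i 'B' then
        if 0 < i ∧ (st.1 ++ ['|']).getD ((st.1 ++ ['|']).length - 2) ' ' = '|' then
          (st.1 ++ ['|'], st.2 + 3)
        else
          (st.1 ++ ['|'], st.2 + 1)
      else
        (st.1 ++ [' '], st.2 - 1)) (([] : List Char), (0 : Int))
    = (pvSig a b n, (List.range n).foldl (pvScoreStep a b) 0) := by
  induction n with
  | zero => simp [pvSig]
  | succ n ih =>
    rw [List.range_succ, List.foldl_append, ih, List.foldl_append]
    simp only [List.foldl_cons, List.foldl_nil]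
    have hlen : (pvSig a b n ++ ['|']).length - 2 = n - 1 := by
      simp [pvSig_length]
    by_cases hm : a.getD n 'A' = b.getD n 'B'
    · have hbar : pvBar a b n = '|' := by rw [pvBar, if_pos hm]
      have hsig : pvSig a b n ++ ['|'] = pvSig a b (n + 1) := by rw [pvSig_succ, hbar]
      rw [if_pos hm, hlen]
      by_cases hn : 0 < n
      · have hprev : (pvSig a b n ++ ['|']).getD (n - 1) ' ' = pvBar a b (n - 1) := by
          rw [List.getD_eq_getElem?_getD,
            List.getElem?_append_left (by rw [pvSig_length]; omega),
            ← List.getD_eq_getElem?_getD, pvSig_getD a b (by omega : n - 1 < n)]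
        by_cases hp : pvBar a b (n - 1) = '|'
        · rw [hprev, if_pos ⟨hn, hp⟩, hsig]
          simp [pvScoreStep, hbar, hn, hp]
        · rw [hprev, if_neg (by rintro ⟨_, h⟩; exact hp h), hsig]
          simp [pvScoreStep, hbar, hp]
      · rw [if_neg (by rintro ⟨h, _⟩; exact hn h), hsig]
        simp [pvScoreStep, hbar, hn]
    · have hbar : pvBar a b n = ' ' := by rw [pvBar, if_neg hm]
      have hsig : pvSig a b n ++ [' '] = pvSig a b (n + 1) := by rw [pvSig_succ, hbar]
      rw [if_neg hm, hsig]
      simp [pvScoreStep, hbar]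

theorem pvAdj_append (p : Option Char) (u v : List Char) :
    pvAdj p (u ++ v) = pvAdj p u + pvAdj (Option.or u.getLast? p) v := by
  induction u generalizing p with
  | nil => simp [pvAdj, Option.or]
  | cons c t ih =>
    simp only [List.cons_append, pvAdj, ih (some c), add_assoc]
    cases t with
    | nil => simp [pvAdj, Option.or]
    | cons d t' =>
      obtain ⟨x, hx⟩ : ∃ x, (d :: t').getLast? = some x := by
        cases h : (d :: t').getLast? with
        | none => simp at h
        | some x => exact ⟨x, rfl⟩
      rw [List.getLast?_cons_cons, hx]
      simp [Option.some_or]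

theorem pvAdj_single (p : Option Char) (d : Char) :
    pvAdj p [d] = (if d = '|' then (if p = some '|' then (3:Int) else 1) else -1) := by
  simp [pvAdj]

theorem scoreStep_eq_adj (a b : List Char) (n : Nat) :
    (List.range n).foldl (pvScoreStep a b) 0 = pvAdj none (pvSig a b n) := by
  induction n with
  | zero => simp [pvSig, pvAdj]
  | succ n ih =>
    rw [List.range_succ, List.foldl_append, ih, pvSig_succ, pvAdj_append,
      List.foldl_cons, List.foldl_nil, pvAdj_single]
    cases n with
    | zero => simp [pvSig, pvScoreStep, pvAdj]
    | succ m =>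
      have hlast : (pvSig a b (m + 1)).getLast? = some (pvBar a b m) := by
        rw [pvSig_succ]; simp
      rw [hlast]
      simp only [pvScoreStep, Option.or]
      by_cases hb : pvBar a b (m + 1) = '|'
      · by_cases hp : pvBar a b m = '|'
        · simp [hb, hp]
        · simp [hb, hp]
      · simp only [hb, if_false]; omega

theorem last_replicate_append (w : List Char) (c : Char) (k : Nat) (hk : k ≠ 0) :
    (w ++ List.replicate k c).getLast? = some c := by
  cases k with
  | zero => exact absurd rfl hk
  | succ m =>
    rw [List.replicate_succ', ← List.append_assoc, List.getLast?_concat]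

-- the invariant of Source B's run-building loop after consuming the prefix u
def pvInv (u : List Char) (st : List (Char × Nat) × Option Char × Nat) : Prop :=
  (st.2.2 = 0 → st.1 = [] ∧ st.2.1 = none ∧ u = []) ∧
  (st.2.2 ≠ 0 → ∃ c, st.2.1 = some c ∧ u = pvExpand st.1 ++ List.replicate st.2.2 c ∧
      pvAdj none u = pvRsum st.1 + pvPart c st.2.2)

theorem pvExpand_concat (rs : List (Char × Nat)) (c : Char) (k : Nat) :
    pvExpand (rs ++ [(c, k)]) = pvExpand rs ++ List.replicate k c := by
  simp [pvExpand]

theorem pvRsum_concat (rs : List (Char × Nat)) (c : Char) (k : Nat) :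
    pvRsum (rs ++ [(c, k)]) = pvRsum rs + pvPart c k := by
  simp [pvRsum, pvPart]

theorem pvInv_step (u : List Char) (st : List (Char × Nat) × Option Char × Nat) (d : Char)
    (h : pvInv u st) : pvInv (u ++ [d]) (pvRleStep st d) := by
  obtain ⟨runs, cur, cnt⟩ := st
  by_cases h0 : cnt = 0
  · obtain ⟨hr, hc, hu⟩ := h.1 h0
    subst h0; subst hu
    simp only at hr hc; subst hr; subst hc
    simp only [pvRleStep]
    rw [if_neg (by simp)]
    refine ⟨by simp, fun _ => ⟨d, by simp, by simp [pvExpand], ?_⟩⟩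
    simp only [pvRsum, pvPart, List.nil_append, pvAdj_single]
    by_cases hd : d = '|' <;> simp [hd]
  · obtain ⟨c, hc, hu, hs⟩ := h.2 h0
    simp only at hc; subst hc
    have hlast : u.getLast? = some c := by rw [hu]; exact last_replicate_append _ _ _ h0
    by_cases hd : d = c
    · subst hd
      have hstep : pvRleStep (runs, some d, cnt) d = (runs, some d, cnt + 1) := by
        simp [pvRleStep]
      rw [hstep]
      refine ⟨by simp [h0], fun _ => ⟨d, rfl, ?_, ?_⟩⟩
      · rw [hu, List.replicate_succ', List.append_assoc]
      · rw [pvAdj_append, pvAdj_single, hs, hlast]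
        simp only [Option.or, pvPart]
        by_cases hdp : d = '|' <;> simp [hdp] <;> omega
    · have hstep : pvRleStep (runs, some c, cnt) d = (runs ++ [(c, cnt)], some d, 1) := by
        simp [pvRleStep, hd, h0]
      rw [hstep]
      refine ⟨by simp, fun _ => ⟨d, rfl, ?_, ?_⟩⟩
      · rw [pvExpand_concat, hu, List.append_assoc, List.replicate_one]
        simp
      · rw [pvAdj_append, pvAdj_single, hs, hlast, pvRsum_concat]
        have hw : (if d = '|' then (if (Option.or (some c) none) = some '|' then (3:Int) else 1) else -1)
            = pvPart d 1 := by
          simp only [Option.or, pvPart]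
          by_cases hdp : d = '|'
          · have : ¬ c = '|' := fun hcp => hd (hdp.trans hcp.symm)
            simp [hdp, this]
          · simp [hdp]
        rw [hw]

theorem pvInv_foldl (l : List Char) : ∀ (u : List Char) (st : List (Char × Nat) × Option Char × Nat),
    pvInv u st → pvInv (u ++ l) (l.foldl pvRleStep st) := by
  induction l with
  | nil => intro u st h; simpa using h
  | cons c t ih =>
    intro u st h
    have := ih (u ++ [c]) (pvRleStep st c) (pvInv_step u st c h)
    simpa [List.append_assoc] using this

theorem pvRuns_spec (xs : List Char) :
    pvExpand (pvRuns xs) = xs ∧ pvRsum (pvRuns xs) = pvAdj none xs := by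
  have h0 : pvInv [] ([], none, 0) := ⟨fun _ => ⟨rfl, rfl, rfl⟩, fun h => absurd rfl h⟩
  have h := pvInv_foldl xs [] ([], none, 0) h0
  rw [List.nil_append] at h
  unfold pvRuns
  by_cases hc : (xs.foldl pvRleStep ([], none, 0)).2.2 = 0
  · obtain ⟨hr, _, hu⟩ := h.1 hc
    rw [if_neg (by simp [hc]), hr, hu]
    exact ⟨rfl, by simp [pvRsum, pvAdj]⟩
  · obtain ⟨c, hcur, hu, hs⟩ := h.2 hc
    rw [if_pos hc, hcur]
    constructor
    · rw [pvExpand_concat]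
      simpa using hu.symm
    · rw [pvRsum_concat]
      simpa using hs.symm

theorem zip_map_eq_sig (a b : List Char) (h : a.length ≤ b.length) :
    (a.zip b).map (fun p => if p.1 = p.2 then '|' else ' ') = pvSig a b a.length := by
  apply List.ext_getElem
  · simp [pvSig, List.length_zip]; omega
  · intro i h1 h2
    simp only [List.length_map, List.length_zip] at h1
    have hia : i < a.length := by omega
    have hib : i < b.length := by omega
    simp [pvSig, pvBar, List.getElem_zip, hia, hib]

-- ===== VERDICT (by name: the statement is the Claim_ definition above) =====
theorem pairwiseScore_spec : Claim_equal_pairwiseScore := by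
  intro seqA seqB _ hpre
  unfold Spec_pairwiseScore pairwiseScore pairwiseScore_alt pairwiseScoreLoop
  rw [pairwiseScoreLoop_eq, zip_map_eq_sig seqA.toList seqB.toList hpre]
  rw [(pvRuns_spec (pvSig seqA.toList seqB.toList seqA.toList.length)).1,
    (pvRuns_spec (pvSig seqA.toList seqB.toList seqA.toList.length)).2,
    ← scoreStep_eq_adj]
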